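-- pv_equiv track=rewrite | github.com/Sony-B-A/Python-Practice | Python-Practice-(GPT-Questions)/GPT_test/10mixed.py | ret_val
-- ===== SOURCE A (Python) =====
-- def ret_val(sent):
--     sent_list = sent.split(" ")
--     word_count = 0
--     vow_count = 0
--     vowels = "aeiou"
--     for ch in sent:
--         if ch in vowels:
--             vow_count += 1
--     for word in sent_list:
--         word_count += 1
--
--     return word_count, vow_count
-- ===== SOURCE B (Python) =====
-- def ret_val(sent):
--     # Build a character-frequency table once, then read off the five
--     # lowercase vowel counts; word count is just len(split(" ")).
--     counts = {}
--     for ch in sent: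
--         counts[ch] = counts.get(ch, 0) + 1
--     vow_count = sum(counts.get(v, 0) for v in "aeiou")
--     return len(sent.split(" ")), vow_count
-- ===== Notes on version B (the rewrite author's own statement) =====
-- stated objective: idiomatic
-- what changed: Replaces the per-character vowel-membership scan with a character-frequency table built once and read at the five lowercase vowel keys, and replaces the word-counting loop with the length of the single-space split.
import Mathlib
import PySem

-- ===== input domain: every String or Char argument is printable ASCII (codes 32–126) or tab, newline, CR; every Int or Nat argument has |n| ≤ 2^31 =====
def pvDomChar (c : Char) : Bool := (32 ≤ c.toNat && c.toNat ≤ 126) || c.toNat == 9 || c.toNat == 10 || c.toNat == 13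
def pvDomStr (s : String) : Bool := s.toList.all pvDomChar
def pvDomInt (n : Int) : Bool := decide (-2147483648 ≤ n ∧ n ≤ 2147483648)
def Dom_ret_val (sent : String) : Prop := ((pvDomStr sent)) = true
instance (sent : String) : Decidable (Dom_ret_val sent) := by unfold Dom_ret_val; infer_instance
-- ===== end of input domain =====

-- B builds a character-frequency table once and reads the five vowel keys,
-- and computes the word count as the length of the split (idiomatic; same cost).

-- ===== PORT A =====
def ret_val (sent : String) : Int × Int :=
  let sentList := (PySem.Str.split? sent " ").getD []
  let vowCount : Int :=
    sent.toList.foldl (fun acc ch => if ch ∈ "aeiou".toList then acc + 1 else acc) 0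
  let wordCount : Int := sentList.foldl (fun acc _ => acc + 1) 0
  (wordCount, vowCount)

-- ===== PORT B =====
def ret_val_alt (sent : String) : Int × Int :=
  let counts : PySem.Dict Char Int :=
    sent.toList.foldl (fun d ch => d.insert ch (d.getD ch 0 + 1)) PySem.Dict.empty
  let vowCount : Int := ("aeiou".toList.map (fun v => counts.getD v 0)).sum
  ((((PySem.Str.split? sent " ").getD []).length : Int), vowCount)

-- ===== PRECONDITION & SPEC =====
def Spec_ret_val (sent : String) (out : Int × Int) : Prop := out = ret_val_alt sent
instance (sent : String) (out : Int × Int) : Decidable (Spec_ret_val sent out) := by unfold Spec_ret_val; infer_instance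

-- ===== CLAIM (what is proved, stated in full; the proofs are below) =====
def Claim_equal_ret_val : Prop := ∀ (sent : String), Dom_ret_val sent → Spec_ret_val sent (ret_val sent)

-- ===== LEMMAS AND PROOFS =====
theorem foldl_count_len {α : Type} (l : List α) (a : Int) :
    l.foldl (fun acc _ => acc + 1) a = a + l.length := by
  induction l generalizing a with
  | nil => simp
  | cons x xs ih => simp [List.foldl, ih]; ring

theorem countP_vowels (l : List Char) :
    (l.countP (fun x =>
        decide (x = 'a') || (decide (x = 'e') || (decide (x = 'i') || (decide (x = 'o') || decide (x = 'u'))))) : Int)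
      = (l.count 'a' : Int) +
          ((l.count 'e' : Int) + ((l.count 'i' : Int) + ((l.count 'o' : Int) + (l.count 'u' : Int)))) := by
  induction l with
  | nil => simp
  | cons x xs ih =>
    simp only [List.countP_cons, List.count_cons]
    push_cast
    by_cases ha : x = 'a' <;> by_cases he : x = 'e' <;> by_cases hi : x = 'i' <;>
      by_cases ho : x = 'o' <;> by_cases hu : x = 'u' <;>
      simp_all <;> omega

-- ===== VERDICT (by name: the statement is the Claim_ definition above) =====
theorem ret_val_spec : Claim_equal_ret_val := by
  intro sent _
  unfold Spec_ret_val ret_val ret_val_alt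
  refine Prod.ext ?_ ?_
  · simp [foldl_count_len]
  · simp only [PySem.List.foldl_ite_add_one, PySem.Dict.getD_foldl_insert_add_one]
    simp [countP_vowels]
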